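-- pv_equiv track=rewrite | github.com/KevinFortuneCodes/fire-detection | phase2_detection_metadata.py | determine_image_label
-- ===== SOURCE A (Python) =====
-- from typing import Dict, List, Sequence, Tuple
--
-- FIRE_LABEL_IDX = 1
--
-- SMOKE_LABEL_IDX = 2
--
-- NOTHING_LABEL_IDX = 3
--
-- FIRE_AND_SMOKE_LABEL_IDX = 4
--
-- def determine_image_label(annotation_list: List[Dict]) -> int:
--     has_fire = any(ann["class_idx"] == FIRE_LABEL_IDX for ann in annotation_list)
--     has_smoke = any(ann["class_idx"] == SMOKE_LABEL_IDX for ann in annotation_list)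
--     if has_fire and has_smoke:
--         return FIRE_AND_SMOKE_LABEL_IDX
--     if has_fire:
--         return FIRE_LABEL_IDX
--     if has_smoke:
--         return SMOKE_LABEL_IDX
--     return NOTHING_LABEL_IDX
-- ===== SOURCE B (Python) =====
-- def determine_image_label(annotation_list):
--     mask = 0
--     for ann in annotation_list:
--         c = ann["class_idx"]
--         if c == 1:
--             mask |= 1
--         elif c == 2:
--             mask |= 2
--     return (3, 1, 2, 4)[mask]
-- ===== Notes on version B (the rewrite author's own statement) =====
-- stated objective: alternative
-- what changed: B makes a single pass folding each annotation's class into a 2-bit presence mask and indexes the answer from a 4-entry tuple, instead of A's two separate short-circuiting any() scans followed by an if/elif ladder.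
-- outside the precondition, e.g. on determine_image_label([{'class_idx': 1}, {'class_idx': 2}, {}]): A returns 4, B raises KeyError
import Mathlib
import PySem

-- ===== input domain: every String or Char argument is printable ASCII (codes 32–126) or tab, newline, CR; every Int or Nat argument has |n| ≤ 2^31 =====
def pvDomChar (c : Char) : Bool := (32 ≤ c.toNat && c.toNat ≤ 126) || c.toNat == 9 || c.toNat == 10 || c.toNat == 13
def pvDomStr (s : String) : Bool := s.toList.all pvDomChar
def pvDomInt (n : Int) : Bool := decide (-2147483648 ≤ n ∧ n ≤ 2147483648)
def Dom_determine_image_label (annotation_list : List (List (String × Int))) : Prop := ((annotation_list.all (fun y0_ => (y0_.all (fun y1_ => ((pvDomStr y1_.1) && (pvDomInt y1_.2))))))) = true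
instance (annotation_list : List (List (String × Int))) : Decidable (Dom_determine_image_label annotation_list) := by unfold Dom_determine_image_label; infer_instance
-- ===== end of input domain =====

-- B replaces A's two separate any() scans + if/elif ladder by a single fold building a
-- 2-bit presence mask indexed into a 4-entry table; same cost, alternative structure.


-- ===== PORT A =====
-- ann["class_idx"]: first-match association-list lookup (dict convention); Pre_ guarantees the key
-- is present in every dict, so the default 0 is never read on admitted inputs.
def pvClassIdx (ann : List (String × Int)) : Int :=
  (((ann.find? (fun p => p.1 == "class_idx")).map (fun p => p.2)).getD 0)

def determine_image_label (annotation_list : List (List (String × Int))) : Int :=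
  let has_fire := annotation_list.any (fun ann => pvClassIdx ann == 1)
  let has_smoke := annotation_list.any (fun ann => pvClassIdx ann == 2)
  if has_fire && has_smoke then 4
  else if has_fire then 1
  else if has_smoke then 2
  else 3

-- ===== PORT B =====
-- one step of Source B's loop body: mask |= 1 on class 1, mask |= 2 on class 2
def bStep (mask : Nat) (ann : List (String × Int)) : Nat :=
  let c := pvClassIdx ann
  if c == 1 then mask ||| 1
  else if c == 2 then mask ||| 2
  else mask

def determine_image_label_alt (annotation_list : List (List (String × Int))) : Int :=
  let mask := annotation_list.foldl bStep 0
  -- (3, 1, 2, 4)[mask]; mask ≤ 3 always, so the default branch is unreachable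
  ([3, 1, 2, 4] : List Int).getD mask 3

-- ===== PRECONDITION & SPEC =====
-- Pre_ excludes lists in which some annotation dict lacks the key "class_idx": Python A raises
-- KeyError there unless, by accident of any()'s short-circuiting, fire and smoke matches both
-- precede the first such dict (and B itself raises KeyError on all of them).
def Pre_determine_image_label (annotation_list : List (List (String × Int))) : Prop :=
  ∀ ann ∈ annotation_list, "class_idx" ∈ ann.map (fun p => p.1)
instance (annotation_list : List (List (String × Int))) : Decidable (Pre_determine_image_label annotation_list) := by unfold Pre_determine_image_label; infer_instance

def pvWitness_determine_image_label : (List (List (String × Int))) :=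
  [[("class_idx", 1)], [("class_idx", 3)]]

def Spec_determine_image_label (annotation_list : List (List (String × Int))) (out : Int) : Prop := out = determine_image_label_alt annotation_list
instance (annotation_list : List (List (String × Int))) (out : Int) : Decidable (Spec_determine_image_label annotation_list out) := by unfold Spec_determine_image_label; infer_instance

-- ===== CLAIM (what is proved, stated in full; the proofs are below) =====
def Claim_equal_determine_image_label : Prop := ∀ (annotation_list : List (List (String × Int))), Dom_determine_image_label annotation_list → Pre_determine_image_label annotation_list → Spec_determine_image_label annotation_list (determine_image_label annotation_list)

-- ===== LEMMAS AND PROOFS =====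

-- the fold's mask is exactly the two any() flags packed into bits 0 and 1
lemma fold_mask (l : List (List (String × Int))) (m : Nat) :
    l.foldl bStep m
      = m ||| (if l.any (fun ann => pvClassIdx ann == 1) then 1 else 0)
          ||| (if l.any (fun ann => pvClassIdx ann == 2) then 2 else 0) := by
  induction l generalizing m with
  | nil => simp
  | cons a t ih =>
    simp only [List.foldl_cons, List.any_cons, bStep]
    by_cases h1 : pvClassIdx a == 1
    · simp only [h1, Bool.true_or, if_true, ih]
      have h2 : (pvClassIdx a == 2) = false := by
        simp_all
      simp only [h2, Bool.false_or]
      cases t.any (fun ann => pvClassIdx ann == 1) <;>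
        cases t.any (fun ann => pvClassIdx ann == 2) <;>
          simp [Nat.or_assoc, Nat.or_comm, Nat.or_left_comm]
    · simp only [h1, Bool.false_or]
      by_cases h2 : pvClassIdx a == 2
      · simp only [h2, if_true, Bool.true_or, ih]
        cases t.any (fun ann => pvClassIdx ann == 1) <;>
          cases t.any (fun ann => pvClassIdx ann == 2) <;>
            simp [Nat.or_assoc, Nat.or_comm, Nat.or_left_comm]
      · simp [h2, ih]

-- ===== VERDICT (by name: the statement is the Claim_ definition above) =====
theorem determine_image_label_spec : Claim_equal_determine_image_label := by
  intro l _ _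
  unfold Spec_determine_image_label determine_image_label determine_image_label_alt
  rw [fold_mask]
  cases l.any (fun ann => pvClassIdx ann == 1) <;>
    cases l.any (fun ann => pvClassIdx ann == 2) <;> simp
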